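-- pv_equiv track=rewrite | github.com/YJ-EBD/MELAUHF-IOT | ABBAS_WEB/router/pages.py | _nas_breadcrumbs
-- ===== SOURCE A (Python) =====
-- def _nas_breadcrumbs(rel_path: str) -> list[dict[str, str]]:
--     crumbs = [{"name": "ROOT", "path": "/"}]
--     parts = [part for part in str(rel_path or "/").strip("/").split("/") if part]
--     acc: list[str] = []
--     for part in parts:
--         acc.append(part)
--         crumbs.append({"name": part, "path": "/" + "/".join(acc)})
--     return crumbs
-- ===== SOURCE B (Python) =====
-- def _nas_breadcrumbs(rel_path: str) -> list[dict[str, str]]: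
--     parts = [part for part in str(rel_path or "/").strip("/").split("/") if part]
--
--     def build(ps: list[str]) -> list[dict[str, str]]:
--         # recursion on the parent path: crumbs of ps = crumbs of ps[:-1] plus the crumb for ps itself
--         if not ps:
--             return [{"name": "ROOT", "path": "/"}]
--         return build(ps[:-1]) + [{"name": ps[-1], "path": "/" + "/".join(ps)}]
--
--     return build(parts)
-- ===== Notes on version B (the rewrite author's own statement) =====
-- stated objective: alternative
-- what changed: B replaces A's left-to-right loop that threads a growing accumulator list with a right-to-left structural recursion on the parent path: the crumbs for ps are the crumbs for ps[:-1] plus one crumb whose path is joined from ps itself, so no loop state is maintained at all.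
import Mathlib
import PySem

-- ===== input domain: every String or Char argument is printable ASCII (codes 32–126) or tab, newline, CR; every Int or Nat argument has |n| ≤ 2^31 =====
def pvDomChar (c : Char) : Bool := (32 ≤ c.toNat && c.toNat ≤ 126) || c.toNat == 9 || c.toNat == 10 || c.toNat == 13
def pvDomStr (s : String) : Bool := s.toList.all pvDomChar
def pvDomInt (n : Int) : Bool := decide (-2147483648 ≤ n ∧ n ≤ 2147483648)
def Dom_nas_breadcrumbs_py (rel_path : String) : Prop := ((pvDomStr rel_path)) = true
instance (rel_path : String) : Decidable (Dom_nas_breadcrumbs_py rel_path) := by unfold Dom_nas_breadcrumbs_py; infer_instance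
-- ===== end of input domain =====

-- B is a right-to-left structural recursion on the parent path (no threaded accumulator);
-- return-value equivalence with A is proved on the whole domain.

-- ===== PORT A =====
-- loop body of A: acc.append(part); crumbs.append({"name": part, "path": "/" + "/".join(acc)})
def pvStepA (st : List String × List (List (String × String))) (part : String) :
    List String × List (List (String × String)) :=
  let acc := st.1 ++ [part]
  (acc, st.2 ++ [[("name", part), ("path", "/" ++ PySem.Str.join "/" acc)]])

def nas_breadcrumbs_py (rel_path : String) : List (List (String × String)) :=
  let crumbs : List (List (String × String)) := [[("name", "ROOT"), ("path", "/")]]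
  let s := if rel_path = "" then "/" else rel_path   -- str(rel_path or "/")
  let parts := ((PySem.Str.split? (PySem.Str.stripChars s "/") "/").getD []).filter (fun p => p ≠ "")
  (parts.foldl pvStepA ([], crumbs)).2

-- ===== PORT B =====
-- build(ps): if not ps: return [ROOT]; return build(ps[:-1]) + [{"name": ps[-1], "path": "/" + "/".join(ps)}]
def pvBuild (ps : List String) : List (List (String × String)) :=
  if h : ps = [] then [[("name", "ROOT"), ("path", "/")]]
  else pvBuild ps.dropLast ++ [[("name", ps.getLast h), ("path", "/" ++ PySem.Str.join "/" ps)]]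
termination_by ps.length
decreasing_by cases ps with
  | nil => exact absurd rfl h
  | cons a as => simp

def nas_breadcrumbs_py_alt (rel_path : String) : List (List (String × String)) :=
  let s := if rel_path = "" then "/" else rel_path
  let parts := ((PySem.Str.split? (PySem.Str.stripChars s "/") "/").getD []).filter (fun p => p ≠ "")
  pvBuild parts

-- ===== PRECONDITION & SPEC =====
def Spec_nas_breadcrumbs_py (rel_path : String) (out : List (List (String × String))) : Prop := out = nas_breadcrumbs_py_alt rel_path
instance (rel_path : String) (out : List (List (String × String))) : Decidable (Spec_nas_breadcrumbs_py rel_path out) := by unfold Spec_nas_breadcrumbs_py; infer_instance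

-- ===== CLAIM (what is proved, stated in full; the proofs are below) =====
def Claim_equal_nas_breadcrumbs_py : Prop := ∀ (rel_path : String), Dom_nas_breadcrumbs_py rel_path → Spec_nas_breadcrumbs_py rel_path (nas_breadcrumbs_py rel_path)

-- ===== LEMMAS AND PROOFS =====

-- ===== VERDICT (by name: the statement is the Claim_ definition above) =====

theorem pv_foldA_fst (parts acc : List String) (c : List (List (String × String))) :
    (parts.foldl pvStepA (acc, c)).1 = acc ++ parts := by
  induction parts generalizing acc c with
  | nil => simp
  | cons p ps ih => simp [pvStepA, ih]

theorem pv_main (parts : List String) :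
    (parts.foldl pvStepA ([], [[("name", "ROOT"), ("path", "/")]])).2 = pvBuild parts := by
  induction parts using List.reverseRecOn with
  | nil => simp [pvBuild]
  | append_singleton l p ih =>
    rw [List.foldl_append]
    have hst : l.foldl pvStepA ([], [[("name", "ROOT"), ("path", "/")]]) =
        (l, pvBuild l) := by
      have h1 := pv_foldA_fst l [] [[("name", "ROOT"), ("path", "/")]]
      exact Prod.ext (by simpa using h1) ih
    rw [hst]
    conv_rhs => rw [pvBuild.eq_def]
    rw [dif_neg (by simp)]
    simp [pvStepA]

theorem nas_breadcrumbs_py_spec : Claim_equal_nas_breadcrumbs_py := by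
  intro rel_path _
  unfold Spec_nas_breadcrumbs_py nas_breadcrumbs_py nas_breadcrumbs_py_alt
  exact pv_main _
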